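-- pv_equiv track=rewrite | github.com/uascodn/logslice | logslice/parser.py | _parse_logfmt
-- ===== SOURCE A (Python) =====
-- from typing import Optional
--
-- def _parse_logfmt(line: str) -> Optional[dict]:
--     """Parse a logfmt-style line (key=value key="quoted value")."""
--     result = {}
--     i = 0
--     while i < len(line):
--         # Skip whitespace
--         while i < len(line) and line[i] == " ":
--             i += 1
--         if i >= len(line):
--             break
--
--         # Read key
--         eq = line.find("=", i)
--         if eq == -1:
--             break
--         key = line[i:eq]
--         i = eq + 1
--
--         # Read value
--         if i < len(line) and line[i] == '"':
--             end = line.find('"', i + 1)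
--             if end == -1:
--                 return None
--             value = line[i + 1:end]
--             i = end + 1
--         else:
--             end = line.find(" ", i)
--             if end == -1:
--                 end = len(line)
--             value = line[i:end]
--             i = end
--
--         if not key:
--             return None
--         result[key] = value
--
--     return result if result else None
-- ===== SOURCE B (Python) =====
-- from typing import Optional
--
--
-- def _scan_until(line: str, i: int, stop: str):
--     """Collect characters from position i until the character `stop`.
--
--     Returns (chars, position after the stop char), or None if `stop`
--     never occurs before the end of the line.
--     """
--     buf = []
--     n = len(line)
--     while i < n:
--         c = line[i]
--         i += 1
--         if c == stop:
--             return buf, i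
--         buf.append(c)
--     return None
--
--
-- def _parse_logfmt(line: str) -> Optional[dict]:
--     """Parse a logfmt-style line (key=value key="quoted value")."""
--     result = {}
--     n = len(line)
--     i = 0
--     while i < n:
--         while i < n and line[i] == " ":
--             i += 1
--         if i >= n:
--             break
--
--         scanned = _scan_until(line, i, "=")
--         if scanned is None:
--             break
--         key_chars, i = scanned
--         if not key_chars:
--             return None
--
--         if i < n and line[i] == '"':
--             scanned = _scan_until(line, i + 1, '"')
--             if scanned is None:
--                 return None
--             val_chars, i = scanned
--         else:
--             val_chars = []
--             while i < n and line[i] != " ":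
--                 val_chars.append(line[i])
--                 i += 1
--
--         result["".join(key_chars)] = "".join(val_chars)
--
--     return result if result else None
-- ===== Notes on version B (the rewrite author's own statement) =====
-- stated objective: alternative
-- what changed: Replaced the str.find-based jump-and-slice parser with a character-level scanner that accumulates key/value characters into buffers via a shared _scan_until helper, checking the empty-key case before reading the value.
import Mathlib
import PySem

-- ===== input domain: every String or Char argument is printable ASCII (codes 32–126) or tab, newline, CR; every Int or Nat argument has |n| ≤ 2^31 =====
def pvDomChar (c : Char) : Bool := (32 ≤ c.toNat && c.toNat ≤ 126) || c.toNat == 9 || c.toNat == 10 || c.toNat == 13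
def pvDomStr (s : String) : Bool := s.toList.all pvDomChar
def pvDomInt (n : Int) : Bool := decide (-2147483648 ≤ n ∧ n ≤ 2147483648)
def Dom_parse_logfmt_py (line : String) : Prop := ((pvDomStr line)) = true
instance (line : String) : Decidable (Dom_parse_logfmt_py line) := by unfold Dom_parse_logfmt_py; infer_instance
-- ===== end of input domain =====

-- B rewrites the str.find jump-and-slice parser as a character-level scanner accumulating
-- key/value buffers via a shared scan-until helper (objective: alternative decomposition).

-- ===== PORT A =====
-- A's loop advances an index i that only grows: the port recurses on the remaining suffix
-- of the line; line.find(c, i) becomes findIdx? on that suffix. Fuel bounds the outer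
-- while (one unit per iteration; each iteration consumes ≥ 1 character, so length+1 suffices).

-- `return result if result else None` (identical final line in both Pythons)
def pvFinish (result : PySem.Dict String String) : Option (List (String × String)) :=
  if result.items.isEmpty then none else some result.items

def pvLoopA (fuel : Nat) (result : PySem.Dict String String) (rest : List Char) :
    Option (List (String × String)) :=
  match fuel with
  | 0 => none
  | fuel + 1 =>
    -- skip whitespace
    let rest1 := rest.dropWhile (· == ' ')
    if rest1.isEmpty then pvFinish result
    else
      -- read key: eq = line.find("=", i)
      match rest1.findIdx? (· == '=') with
      | none => pvFinish result
      | some eq =>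
        let key := rest1.take eq
        let rest2 := rest1.drop (eq + 1)
        -- read value
        if rest2.head? = some '"' then
          let tl := rest2.drop 1
          match tl.findIdx? (· == '"') with
          | none => none
          | some e =>
            let value := tl.take e
            let rest3 := tl.drop (e + 1)
            if key.isEmpty then none
            else pvLoopA fuel (result.insert (String.ofList key) (String.ofList value)) rest3
        else
          let endi := (rest2.findIdx? (· == ' ')).getD rest2.length
          let value := rest2.take endi
          let rest3 := rest2.drop endi
          if key.isEmpty then none
          else pvLoopA fuel (result.insert (String.ofList key) (String.ofList value)) rest3

def parse_logfmt_py (line : String) : Option (List (String × String)) :=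
  pvLoopA (line.toList.length + 1) PySem.Dict.empty line.toList

-- ===== PORT B =====
-- helper _scan_until: collect chars until `stop`; none if `stop` never occurs
def pvScanUntil (stop : Char) (buf : List Char) (l : List Char) :
    Option (List Char × List Char) :=
  match l with
  | [] => none
  | c :: tl => if c = stop then some (buf, tl) else pvScanUntil stop (buf ++ [c]) tl

-- unquoted value: collect chars up to (not including) the next space
def pvScanValue (buf : List Char) (l : List Char) : List Char × List Char :=
  match l with
  | [] => (buf, [])
  | c :: tl => if c = ' ' then (buf, c :: tl) else pvScanValue (buf ++ [c]) tl


def pvLoopB (fuel : Nat) (result : PySem.Dict String String) (rest : List Char) :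
    Option (List (String × String)) :=
  match fuel with
  | 0 => none
  | fuel + 1 =>
    let rest1 := rest.dropWhile (· == ' ')
    if rest1.isEmpty then pvFinish result
    else
      match pvScanUntil '=' [] rest1 with
      | none => pvFinish result
      | some (key, rest2) =>
        if key.isEmpty then none
        else if rest2.head? = some '"' then
          match pvScanUntil '"' [] (rest2.drop 1) with
          | none => none
          | some (value, rest3) =>
            pvLoopB fuel (result.insert (String.ofList key) (String.ofList value)) rest3
        else
          let (value, rest3) := pvScanValue [] rest2
          pvLoopB fuel (result.insert (String.ofList key) (String.ofList value)) rest3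

def parse_logfmt_py_alt (line : String) : Option (List (String × String)) :=
  pvLoopB (line.toList.length + 1) PySem.Dict.empty line.toList

-- ===== PRECONDITION & SPEC =====
def Spec_parse_logfmt_py (line : String) (out : Option (List (String × String))) : Prop := out = parse_logfmt_py_alt line
instance (line : String) (out : Option (List (String × String))) : Decidable (Spec_parse_logfmt_py line out) := by unfold Spec_parse_logfmt_py; infer_instance

-- ===== CLAIM (what is proved, stated in full; the proofs are below) =====
def Claim_equal_parse_logfmt_py : Prop := ∀ (line : String), Dom_parse_logfmt_py line → Spec_parse_logfmt_py line (parse_logfmt_py line)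

-- ===== LEMMAS AND PROOFS =====

-- B's scan-until is A's find-then-slice
lemma pvScanUntil_eq (stop : Char) :
    ∀ (l buf : List Char),
      pvScanUntil stop buf l =
        (l.findIdx? (· == stop)).map (fun k => (buf ++ l.take k, l.drop (k + 1))) := by
  intro l
  induction l with
  | nil => intro buf; simp [pvScanUntil]
  | cons c tl ih =>
    intro buf
    simp only [pvScanUntil, List.findIdx?_cons]
    by_cases h : c = stop
    · simp [h]
    · simp only [h, beq_iff_eq, ih (buf ++ [c])]
      cases tl.findIdx? (· == stop) with
      | none => simp
      | some k => simp [List.take_succ_cons, List.drop_succ_cons]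

-- B's unquoted-value scan is A's find-space-then-slice
lemma pvScanValue_eq :
    ∀ (l buf : List Char),
      pvScanValue buf l =
        (buf ++ l.take ((l.findIdx? (· == ' ')).getD l.length),
         l.drop ((l.findIdx? (· == ' ')).getD l.length)) := by
  intro l
  induction l with
  | nil => intro buf; simp [pvScanValue]
  | cons c tl ih =>
    intro buf
    simp only [pvScanValue, List.findIdx?_cons]
    by_cases h : c = ' '
    · simp [h]
    · simp only [h, beq_iff_eq, ih (buf ++ [c])]
      cases tl.findIdx? (· == ' ') with
      | none => simp
      | some k => simp [List.take_succ_cons, List.drop_succ_cons]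

lemma pvLoop_eq :
    ∀ (fuel : Nat) (result : PySem.Dict String String) (rest : List Char),
      pvLoopA fuel result rest = pvLoopB fuel result rest := by
  intro fuel
  induction fuel with
  | zero => intro result rest; rfl
  | succ n ih =>
    intro result rest
    simp only [pvLoopA, pvLoopB]
    by_cases h1 : (rest.dropWhile (· == ' ')).isEmpty
    · simp [h1]
    · simp only [h1, if_neg, Bool.not_eq_true]
      rw [pvScanUntil_eq]
      cases hf : (rest.dropWhile (· == ' ')).findIdx? (· == '=') with
      | none => simp
      | some eq =>
        simp only [Option.map_some, List.nil_append]
        by_cases hk : ((rest.dropWhile (· == ' ')).take eq).isEmpty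
        · -- empty key: both sides return none in every value branch
          by_cases hq : ((rest.dropWhile (· == ' ')).drop (eq + 1)).head? = some '"'
          · simp only [hq, if_pos, hk]
            cases ((rest.dropWhile (· == ' ')).drop (eq + 1)).drop 1 |>.findIdx? (· == '"') <;>
              simp
          · rw [if_neg hq]; simp [hk]
        · simp only [hk, if_neg, Bool.not_eq_true]
          by_cases hq : ((rest.dropWhile (· == ' ')).drop (eq + 1)).head? = some '"'
          · simp only [hq, if_pos]
            rw [pvScanUntil_eq]
            cases ((rest.dropWhile (· == ' ')).drop (eq + 1)).drop 1 |>.findIdx? (· == '"') with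
            | none => simp
            | some e => simp [ih]
          · simp only [hq]
            rw [pvScanValue_eq]
            simp [ih]

-- ===== VERDICT (by name: the statement is the Claim_ definition above) =====
theorem parse_logfmt_py_spec : Claim_equal_parse_logfmt_py := by
  intro line _
  show parse_logfmt_py line = parse_logfmt_py_alt line
  unfold parse_logfmt_py parse_logfmt_py_alt
  exact pvLoop_eq _ _ _
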